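-- pv_equiv track=rewrite | github.com/wfrancis/swiss | glossary_baseline_eval.py | translate_query
-- ===== SOURCE A (Python) =====
-- def translate_query(query: str, glossary: dict) -> str:
--     """Translate English legal terms to German using glossary."""
--     flat = glossary.get("flat_lookup", {})
--     query_lower = query.lower()
--     german_terms = []
--
--     # Sort by length (longer terms first to avoid partial matches)
--     sorted_terms = sorted(flat.keys(), key=len, reverse=True)
--     for en_term in sorted_terms:
--         if en_term in query_lower:
--             german_terms.append(flat[en_term]["de"])
--
--     return " ".join(german_terms) if german_terms else query
-- ===== SOURCE B (Python) =====
-- def translate_query(query: str, glossary: dict) -> str: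
--     """Translate English legal terms to German using glossary."""
--     flat = glossary.get("flat_lookup", {})
--     q = query.lower()
--     n = len(q)
--     # Bound on useful substring lengths: the longest glossary term.
--     maxlen = 0
--     for t in flat:
--         maxlen = max(maxlen, len(t))
--     # Scan the QUERY once: hash every substring of length <= maxlen into the
--     # glossary dict; collect the set of terms that occur in the query.
--     hits = set()
--     for i in range(n + 1):
--         for j in range(i, min(i + maxlen, n) + 1):
--             sub = q[i:j]
--             if sub in flat:
--                 hits.add(sub)
--     matched = [(t, e["de"]) for t, e in flat.items() if t in hits]
--     matched.sort(key=lambda m: len(m[0]), reverse=True)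
--     return " ".join(de for _, de in matched) if matched else query
-- ===== Notes on version B (the rewrite author's own statement) =====
-- stated objective: alternative
-- what changed: B finds matches by scanning the QUERY: it enumerates the query's substrings up to the longest glossary term's length and hash-looks each up in the glossary dict, collecting the matching terms in a set, instead of A's per-term substring search over all glossary keys; only the matches are then length-sorted.
import Mathlib
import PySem

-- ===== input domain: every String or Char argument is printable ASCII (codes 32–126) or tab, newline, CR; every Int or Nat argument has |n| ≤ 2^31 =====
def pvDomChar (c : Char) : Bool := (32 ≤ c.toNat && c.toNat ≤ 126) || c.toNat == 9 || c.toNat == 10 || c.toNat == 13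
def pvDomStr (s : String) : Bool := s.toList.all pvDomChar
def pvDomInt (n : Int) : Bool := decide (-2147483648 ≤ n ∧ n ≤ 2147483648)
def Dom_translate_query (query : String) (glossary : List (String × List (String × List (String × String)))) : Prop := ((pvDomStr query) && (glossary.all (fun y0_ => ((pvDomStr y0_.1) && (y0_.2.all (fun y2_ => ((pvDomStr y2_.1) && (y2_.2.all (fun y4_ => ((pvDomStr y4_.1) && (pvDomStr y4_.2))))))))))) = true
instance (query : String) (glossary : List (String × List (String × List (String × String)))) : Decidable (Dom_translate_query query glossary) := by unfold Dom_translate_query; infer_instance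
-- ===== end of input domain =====

-- B scans the QUERY instead of the terms: it enumerates the query's substrings up to the
-- longest term's length, hash-looks each up in the glossary dict (a set collects the hits),
-- and length-sorts only the matches; objective: alternative algorithm. Return value only.

-- ===== PORT A =====
def translate_query (query : String) (glossary : List (String × List (String × List (String × String)))) : String :=
  let flat : PySem.Dict String (List (String × String)) :=
    PySem.Dict.ofList ((PySem.Dict.ofList glossary).getD "flat_lookup" [])
  let query_lower := PySem.Str.lower query
  -- sorted(flat.keys(), key=len, reverse=True)
  let sorted_terms := PySem.List.sorted flat.keys (fun t => PySem.Str.len t) true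
  -- for en_term in sorted_terms: if en_term in query_lower: german_terms.append(flat[en_term]["de"])
  -- flat[en_term]["de"]: the "de" lookup raises KeyError when absent — excluded by Pre_ (getD "" here)
  let german_terms := sorted_terms.foldl
    (fun acc t => if PySem.Str.isIn t query_lower
      then acc ++ [(PySem.Dict.ofList (flat.getD t [])).getD "de" ""] else acc) []
  if german_terms ≠ [] then PySem.Str.join " " german_terms else query

-- ===== PORT B =====
def translate_query_alt (query : String) (glossary : List (String × List (String × List (String × String)))) : String :=
  let flat : PySem.Dict String (List (String × String)) :=
    PySem.Dict.ofList ((PySem.Dict.ofList glossary).getD "flat_lookup" [])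
  let q := PySem.Str.lower query
  let n : Int := PySem.Str.len q
  -- maxlen = 0; for t in flat: maxlen = max(maxlen, len(t))
  let maxlen : Int := flat.keys.foldl (fun m t => max m (PySem.Str.len t)) 0
  -- for i in range(n+1): for j in range(i, min(i+maxlen, n)+1): if q[i:j] in flat: hits.add(q[i:j])
  let hits : PySem.Set String :=
    (PySem.List.pyRange 0 (n+1) 1).foldl (fun hs i =>
      (PySem.List.pyRange i (min (i+maxlen) n + 1) 1).foldl (fun hs j =>
        if flat.contains (PySem.Str.slice q (some i) (some j))
        then PySem.Set.add hs (PySem.Str.slice q (some i) (some j)) else hs) hs)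
      PySem.Set.empty
  -- matched = [(t, e["de"]) for t, e in flat.items() if t in hits]  ("de" lookup Pre_-guarded as in A)
  let matched := (flat.items.filter (fun kv => PySem.Set.contains hits kv.1)).map
      (fun kv => (kv.1, (PySem.Dict.ofList kv.2).getD "de" ""))
  -- matched.sort(key=lambda m: len(m[0]), reverse=True)
  let ms := PySem.List.sorted matched (fun m => PySem.Str.len m.1) true
  if ms ≠ [] then PySem.Str.join " " (ms.map (·.2)) else query

-- ===== PRECONDITION & SPEC =====
-- Pre_ excludes exactly the inputs where A raises KeyError: a glossary term that occurs as a
-- substring of the lowered query but whose entry has no "de" key.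
def Pre_translate_query (query : String) (glossary : List (String × List (String × List (String × String)))) : Prop :=
  ∀ kv ∈ (PySem.Dict.ofList ((PySem.Dict.ofList glossary).getD "flat_lookup" [])).items,
    PySem.Str.isIn kv.1 (PySem.Str.lower query) = true →
      "de" ∈ (PySem.Dict.ofList kv.2).keys
instance (query : String) (glossary : List (String × List (String × List (String × String)))) : Decidable (Pre_translate_query query glossary) := by unfold Pre_translate_query; infer_instance

def pvWitness_translate_query : String × (List (String × List (String × List (String × String)))) :=
  ("contract law", [("flat_lookup", [("contract", [("de", "Vertrag")])])])

def Spec_translate_query (query : String) (glossary : List (String × List (String × List (String × String)))) (out : String) : Prop := out = translate_query_alt query glossary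
instance (query : String) (glossary : List (String × List (String × List (String × String)))) (out : String) : Decidable (Spec_translate_query query glossary out) := by unfold Spec_translate_query; infer_instance

-- ===== CLAIM (what is proved, stated in full; the proofs are below) =====
def Claim_equal_translate_query : Prop := ∀ (query : String) (glossary : List (String × List (String × List (String × String)))), Dom_translate_query query glossary → Pre_translate_query query glossary → Spec_translate_query query glossary (translate_query query glossary)

-- ===== LEMMAS AND PROOFS =====

-- membership after a fold whose step adds elements characterized by P
lemma pv_mem_foldl_step {α β : Type} (step : List α → β → List α) (P : β → α → Prop)
    (h : ∀ hs b x, x ∈ step hs b ↔ x ∈ hs ∨ P b x) :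
    ∀ (l : List β) (hs : List α) (x : α), x ∈ l.foldl step hs ↔ x ∈ hs ∨ ∃ b ∈ l, P b x := by
  intro l
  induction l with
  | nil => intro hs x; simp
  | cons b bs ih =>
    intro hs x
    simp only [List.foldl_cons, ih, h]
    constructor
    · rintro ((hx | hx) | ⟨c, hc, hPc⟩)
      · exact Or.inl hx
      · exact Or.inr ⟨b, by simp, hx⟩
      · exact Or.inr ⟨c, by simp [hc], hPc⟩
    · rintro (hx | ⟨c, hc, hPc⟩)
      · exact Or.inl (Or.inl hx)
      · rcases List.mem_cons.mp hc with rfl | hc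
        · exact Or.inl (Or.inr hPc)
        · exact Or.inr ⟨c, hc, hPc⟩

-- the substring-set built by B's nested loops
lemma pv_mem_hits (q : String) (flat : PySem.Dict String (List (String × String)))
    (maxlen : Int) (x : String) :
    x ∈ (PySem.List.pyRange 0 (PySem.Str.len q + 1) 1).foldl (fun hs i =>
        (PySem.List.pyRange i (min (i + maxlen) (PySem.Str.len q) + 1) 1).foldl (fun hs j =>
          if flat.contains (PySem.Str.slice q (some i) (some j))
          then PySem.Set.add hs (PySem.Str.slice q (some i) (some j)) else hs) hs)
        PySem.Set.empty
      ↔ ∃ i j : Int, 0 ≤ i ∧ i ≤ j ∧ j ≤ min (i + maxlen) (PySem.Str.len q) ∧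
          flat.contains (PySem.Str.slice q (some i) (some j)) = true ∧
          PySem.Str.slice q (some i) (some j) = x := by
  rw [pv_mem_foldl_step _
    (fun i x => ∃ j ∈ PySem.List.pyRange i (min (i + maxlen) (PySem.Str.len q) + 1) 1,
      flat.contains (PySem.Str.slice q (some i) (some j)) = true ∧
      PySem.Str.slice q (some i) (some j) = x)
    (fun hs i x => by
      rw [pv_mem_foldl_step _
        (fun j x => flat.contains (PySem.Str.slice q (some i) (some j)) = true ∧
          PySem.Str.slice q (some i) (some j) = x)
        (fun hs j x => by
          by_cases hc : flat.contains (PySem.Str.slice q (some i) (some j)) = true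
          · simp [hc, PySem.Set.mem_add, eq_comm]
          · simp [hc])])]
  constructor
  · rintro (hx | ⟨i, hi, j, hj, hc, hsl⟩)
    · simp [PySem.Set.empty] at hx
    · rw [PySem.List.mem_pyRange_one] at hi hj
      exact ⟨i, j, hi.1, hj.1, by omega, hc, hsl⟩
  · rintro ⟨i, j, h0, hij, hjn, hc, hsl⟩
    refine Or.inr ⟨i, ?_, j, ?_, hc, hsl⟩
    · rw [PySem.List.mem_pyRange_one]; omega
    · rw [PySem.List.mem_pyRange_one]; omega

-- every key's length is bounded by the maxlen fold
lemma pv_len_le_maxlen (keys : List String) (t : String) (ht : t ∈ keys) :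
    PySem.Str.len t ≤ keys.foldl (fun m s => max m (PySem.Str.len s)) 0 := by
  have : keys.foldl (fun m s => max m (PySem.Str.len s)) 0
      = (keys.map PySem.Str.len).foldl max 0 := by
    rw [List.foldl_map]
  rw [this]
  exact (PySem.List.le_foldl_max _ _).2 _ (List.mem_map_of_mem ht)

-- a term is in B's hit set iff it is a key occurring as a substring of q
lemma pv_hits_iff_isIn (q : String) (flat : PySem.Dict String (List (String × String)))
    (t : String) (ht : t ∈ flat.keys) :
    t ∈ (PySem.List.pyRange 0 (PySem.Str.len q + 1) 1).foldl (fun hs i =>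
        (PySem.List.pyRange i (min (i + flat.keys.foldl (fun m s => max m (PySem.Str.len s)) 0)
            (PySem.Str.len q) + 1) 1).foldl (fun hs j =>
          if flat.contains (PySem.Str.slice q (some i) (some j))
          then PySem.Set.add hs (PySem.Str.slice q (some i) (some j)) else hs) hs)
        PySem.Set.empty
      ↔ PySem.Str.isIn t q = true := by
  rw [pv_mem_hits]
  constructor
  · rintro ⟨i, j, h0, hij, hjn, _, hsl⟩
    rw [PySem.Str.isIn_iff_infix]
    have hlist : t.toList = (q.toList.drop i.toNat).take (j.toNat - i.toNat) := by
      rw [← hsl, PySem.Str.toList_slice, PySem.Chars.slice_eq_listSlice,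
        PySem.List.slice_toNat q.toList h0 (by omega)]
    rw [hlist]
    exact ((List.take_prefix _ _).isInfix).trans (List.drop_suffix _ _).isInfix
  · intro hin
    rcases (PySem.Str.isIn_iff_infix t q).mp hin with ⟨pre, suf, hq⟩
    rw [List.append_assoc] at hq
    have hlen : PySem.Str.len t = (t.toList.length : Int) := PySem.Str.len_eq t
    have hnq : PySem.Str.len q = (q.toList.length : Int) := PySem.Str.len_eq q
    have hqlen : pre.length + (t.toList.length + suf.length) = q.toList.length := by
      rw [← hq]; simp
    have hslice : PySem.Str.slice q (some (pre.length : Int))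
        (some ((pre.length : Int) + (t.toList.length : Int))) = t := by
      apply String.toList_inj.mp
      rw [PySem.Str.toList_slice, PySem.Chars.slice_eq_listSlice,
        PySem.List.slice_natCast_add q.toList pre.length t.toList.length, ← hq,
        List.drop_left, List.take_left]
    have hmax : PySem.Str.len t ≤ flat.keys.foldl (fun m s => max m (PySem.Str.len s)) 0 :=
      pv_len_le_maxlen flat.keys t ht
    refine ⟨(pre.length : Int), (pre.length : Int) + (t.toList.length : Int),
      by positivity, by omega, by omega, ?_, hslice⟩
    rw [hslice, PySem.Dict.contains_eq_decide_mem_keys]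
    simpa using ht

-- insertBy with a descending Int key puts x in front when it beats every element
lemma pv_insertBy_head {α : Type} (key : α → Int) (x : α) (l : List α)
    (h : ∀ z ∈ l, key z < key x) :
    PySem.List.insertBy (fun a c => decide (key c < key a)) x l = x :: l := by
  cases l with
  | nil => rfl
  | cons y ys => simp [PySem.List.insertBy, h y (by simp)]

lemma pv_insertBy_pairwise {α : Type} (key : α → Int) (x : α) (l : List α)
    (h : l.Pairwise (fun a c => key c ≤ key a)) :
    (PySem.List.insertBy (fun a c => decide (key c < key a)) x l).Pairwise
      (fun a c => key c ≤ key a) := by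
  induction l with
  | nil => simp [PySem.List.insertBy]
  | cons y ys ih =>
    rcases List.pairwise_cons.mp h with ⟨hy, hys⟩
    by_cases hb : key y < key x
    · simp only [PySem.List.insertBy, hb, decide_true, if_true]
      refine List.pairwise_cons.mpr ⟨?_, h⟩
      intro z hz
      rcases List.mem_cons.mp hz with hz | hz
      · subst hz; exact le_of_lt hb
      · exact le_trans (hy z hz) (le_of_lt hb)
    · simp only [PySem.List.insertBy, hb, decide_false, Bool.false_eq_true, if_false]
      refine List.pairwise_cons.mpr ⟨?_, ih hys⟩
      intro z hz
      rcases (PySem.List.mem_insertBy _ x z ys).mp hz with hz | hz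
      · subst hz; omega
      · exact hy z hz

lemma pv_insertBy_filter {α : Type} (key : α → Int) (p : α → Bool) (x : α) (l : List α)
    (h : l.Pairwise (fun a c => key c ≤ key a)) :
    (PySem.List.insertBy (fun a c => decide (key c < key a)) x l).filter p =
      if p x then PySem.List.insertBy (fun a c => decide (key c < key a)) x (l.filter p)
      else l.filter p := by
  induction l with
  | nil => cases hx : p x <;> simp [PySem.List.insertBy, hx]
  | cons y ys ih =>
    rcases List.pairwise_cons.mp h with ⟨hy, hys⟩
    by_cases hb : key y < key x
    · simp only [PySem.List.insertBy, hb, decide_true, if_true]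
      cases hx : p x with
      | false => simp [List.filter_cons, hx]
      | true =>
        cases hpy : p y with
        | true =>
          simp only [List.filter_cons, hx, hpy, if_true]
          simp [PySem.List.insertBy, hb]
        | false =>
          simp only [List.filter_cons, hx, hpy, if_true, Bool.false_eq_true, if_false]
          rw [pv_insertBy_head key x (ys.filter p)
            (fun z hz => lt_of_le_of_lt (hy z (List.mem_of_mem_filter hz)) hb)]
    · simp only [PySem.List.insertBy, hb, decide_false, Bool.false_eq_true, if_false]
      cases hpy : p y with
      | true =>
        simp only [List.filter_cons, hpy, if_true, ih hys]
        cases hx : p x with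
        | false => simp
        | true => simp [PySem.List.insertBy, hb]
      | false =>
        simp only [List.filter_cons, hpy, Bool.false_eq_true, if_false, ih hys]

-- the insertion-sort fold commutes with filter (descending Int key)
lemma pv_foldl_insertBy_filter {α : Type} (key : α → Int) (p : α → Bool) (l : List α) :
    ∀ acc : List α, acc.Pairwise (fun a c => key c ≤ key a) →
      (l.foldl (fun acc x => PySem.List.insertBy (fun a c => decide (key c < key a)) x acc) acc).filter p
        = (l.filter p).foldl (fun acc x => PySem.List.insertBy (fun a c => decide (key c < key a)) x acc) (acc.filter p) := by
  induction l with
  | nil => intro acc _; rfl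
  | cons x xs ih =>
    intro acc hacc
    simp only [List.foldl_cons]
    rw [ih _ (pv_insertBy_pairwise key x acc hacc), pv_insertBy_filter key p x acc hacc]
    cases hx : p x with
    | true => simp [List.filter, hx]
    | false => simp [List.filter, hx]

lemma pv_sorted_rev_filter {α : Type} (key : α → Int) (p : α → Bool) (l : List α) :
    (PySem.List.sorted l key true).filter p = PySem.List.sorted (l.filter p) key true := by
  rw [PySem.List.sorted_rev_eq_foldl_insertBy, PySem.List.sorted_rev_eq_foldl_insertBy]
  simpa using pv_foldl_insertBy_filter key p l [] (by simp)

lemma pv_insertBy_map {α β : Type} (g : α → β) (b : β → β → Bool) (x : α) (l : List α) :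
    (PySem.List.insertBy (fun a c => b (g a) (g c)) x l).map g
      = PySem.List.insertBy b (g x) (l.map g) := by
  induction l with
  | nil => rfl
  | cons y ys ih =>
    by_cases hb : b (g x) (g y)
    · simp [PySem.List.insertBy, hb]
    · simp [PySem.List.insertBy, hb, ih]

lemma pv_sorted_rev_map {α β : Type} (g : α → β) (key : β → Int) (l : List α) :
    PySem.List.sorted (l.map g) key true
      = (PySem.List.sorted l (fun a => key (g a)) true).map g := by
  rw [PySem.List.sorted_rev_eq_foldl_insertBy, PySem.List.sorted_rev_eq_foldl_insertBy,
    List.foldl_map]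
  suffices h : ∀ acc : List α,
      l.foldl (fun acc x => PySem.List.insertBy (fun a c => decide (key c < key a)) (g x) acc) (acc.map g)
        = (l.foldl (fun acc x => PySem.List.insertBy (fun a c => decide (key (g c) < key (g a))) x acc) acc).map g by
    simpa using h []
  induction l with
  | nil => intro acc; rfl
  | cons x xs ih =>
    intro acc
    simp only [List.foldl_cons]
    rw [← pv_insertBy_map g (fun a c => decide (key c < key a)) x acc, ih]

-- the two result lists coincide
lemma pv_lists_eq (query : String) (glossary : List (String × List (String × List (String × String)))) :
    (PySem.List.sorted (PySem.Dict.ofList ((PySem.Dict.ofList glossary).getD "flat_lookup" [])).keys (fun t => PySem.Str.len t) true).foldl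
      (fun acc t => if PySem.Str.isIn t (PySem.Str.lower query)
        then acc ++ [(PySem.Dict.ofList ((PySem.Dict.ofList ((PySem.Dict.ofList glossary).getD "flat_lookup" [])).getD t [])).getD "de" ""] else acc) []
    = (PySem.List.sorted
        (((PySem.Dict.ofList ((PySem.Dict.ofList glossary).getD "flat_lookup" [])).items.filter
            (fun kv => PySem.Set.contains
              ((PySem.List.pyRange 0 (PySem.Str.len (PySem.Str.lower query) + 1) 1).foldl (fun hs i =>
                (PySem.List.pyRange i (min (i + (PySem.Dict.ofList ((PySem.Dict.ofList glossary).getD "flat_lookup" [])).keys.foldl (fun m s => max m (PySem.Str.len s)) 0)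
                    (PySem.Str.len (PySem.Str.lower query)) + 1) 1).foldl (fun hs j =>
                  if (PySem.Dict.ofList ((PySem.Dict.ofList glossary).getD "flat_lookup" [])).contains (PySem.Str.slice (PySem.Str.lower query) (some i) (some j))
                  then PySem.Set.add hs (PySem.Str.slice (PySem.Str.lower query) (some i) (some j)) else hs) hs)
                PySem.Set.empty) kv.1)).map
          (fun kv => (kv.1, (PySem.Dict.ofList kv.2).getD "de" "")))
        (fun m => PySem.Str.len m.1) true).map (·.2) := by
  set flat : PySem.Dict String (List (String × String)) :=
    PySem.Dict.ofList ((PySem.Dict.ofList glossary).getD "flat_lookup" []) with hflat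
  set ql := PySem.Str.lower query with hql
  have hA := PySem.List.foldl_append_if (fun t => PySem.Str.isIn t ql)
    (fun t => (PySem.Dict.ofList (flat.getD t [])).getD "de" "")
    (PySem.List.sorted flat.keys (fun t => PySem.Str.len t) true) []
  beta_reduce at hA
  rw [hA]
  simp only [List.nil_append]
  rw [pv_sorted_rev_filter]
  have hfil : flat.items.filter (fun kv => PySem.Set.contains
        ((PySem.List.pyRange 0 (PySem.Str.len ql + 1) 1).foldl (fun hs i =>
          (PySem.List.pyRange i (min (i + flat.keys.foldl (fun m s => max m (PySem.Str.len s)) 0)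
              (PySem.Str.len ql) + 1) 1).foldl (fun hs j =>
            if flat.contains (PySem.Str.slice ql (some i) (some j))
            then PySem.Set.add hs (PySem.Str.slice ql (some i) (some j)) else hs) hs)
          PySem.Set.empty) kv.1)
      = flat.items.filter (fun kv => PySem.Str.isIn kv.1 ql) := by
    apply List.filter_congr
    intro kv hkv
    have hk : kv.1 ∈ flat.keys := PySem.Dict.mem_keys_of_mem_items flat hkv
    have h1 := (PySem.Set.contains_iff _ kv.1).trans (pv_hits_iff_isIn ql flat kv.1 hk)
    cases h2 : PySem.Str.isIn kv.1 ql with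
    | true => simpa [h2] using h1.mpr h2
    | false =>
      cases h3 : PySem.Set.contains _ kv.1 with
      | false => rfl
      | true => exact absurd (h1.mp h3) (by rw [h2]; simp)
  rw [hfil]
  rw [pv_sorted_rev_map (fun kv : String × List (String × String) =>
    (kv.1, (PySem.Dict.ofList kv.2).getD "de" "")) (fun m => PySem.Str.len m.1)]
  have hkeys : flat.keys = flat.items.map (·.1) := rfl
  rw [hkeys, List.filter_map,
    pv_sorted_rev_map (·.1) (fun t => PySem.Str.len t) (flat.items.filter _),
    List.map_map, List.map_map]
  dsimp only
  apply List.map_congr_left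
  intro kv hkv
  have hmem : kv ∈ flat.items :=
    List.mem_of_mem_filter ((PySem.List.mem_sorted _ _ _ _).mp hkv)
  have hget : flat.getD kv.1 [] = kv.2 := by
    obtain ⟨k, v⟩ := kv
    exact PySem.Dict.getD_of_mem_items flat hmem (PySem.Dict.nodup_keys_ofList _) []
  simp [Function.comp, hget]


-- the emptiness tests of A and B agree (A tests the mapped list, B the pair list)
lemma pv_if_map (L : List (String × String)) (q : String) :
    (if L.map (fun m => m.2) ≠ [] then PySem.Str.join " " (L.map (fun m => m.2)) else q)
      = (if L ≠ [] then PySem.Str.join " " (L.map (fun m => m.2)) else q) := by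
  cases L <;> simp

-- ===== VERDICT (by name: the statement is the Claim_ definition above) =====
theorem translate_query_spec : Claim_equal_translate_query := by
  intro query glossary _ _
  unfold Spec_translate_query translate_query translate_query_alt
  dsimp only
  rw [pv_lists_eq query glossary]
  exact pv_if_map _ _
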